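-- pv_equiv track=rewrite | github.com/SanketSrivastava17/srm_coding_round_template | q1.py | first_stable_character
-- ===== SOURCE A (Python) =====
-- def first_stable_character(s):
--     """
--     Find the first stable character in the string.
--
--     A character is stable if:
--     1. It appears at least twice
--     2. All occurrences are in one continuous group
--
--     Args:
--         s (str): Input string
--
--     Returns:
--         str or None: First stable character, or None if no stable character exists
--
--     Examples:
--         >>> first_stable_character("abccba")
--         'c'
--         >>> first_stable_character("abc")
--         None
--         >>> first_stable_character("a")
--         None
--     """
--     if len(s) == 0:
--         return None
--
--     seen = set()
--
--     i = 0
--     while i < len(s):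
--         char = s[i]
--
--
--         if char in seen:
--             i += 1
--             continue
--
--
--         count = 1
--         j = i + 1
--         while j < len(s) and s[j] == char:
--             count += 1
--             j += 1
--
--         appears_later = False
--         for k in range(j, len(s)):
--             if s[k] == char:
--                 appears_later = True
--                 break
--
--         if count >= 2 and not appears_later:
--             return char
--
--         seen.add(char)
--         i = j if j > i else i + 1
--
--     return None
-- ===== SOURCE B (Python) =====
-- def first_stable_character(s):
--     first = {}
--     last = {}
--     count = {}
--     for i, c in enumerate(s):
--         if c not in first:
--             first[c] = i
--         last[c] = i
--         count[c] = count.get(c, 0) + 1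
--     for c in s:
--         if count[c] >= 2 and last[c] - first[c] + 1 == count[c]:
--             return c
--     return None
-- ===== Notes on version B (the rewrite author's own statement) =====
-- stated objective: alternative
-- what changed: Replaces A's nested scans (run-length walk plus an inner appears-later scan per new character) with one pass building first/last/count dictionaries followed by one scan testing count>=2 and last-first+1==count.
import Mathlib
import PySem

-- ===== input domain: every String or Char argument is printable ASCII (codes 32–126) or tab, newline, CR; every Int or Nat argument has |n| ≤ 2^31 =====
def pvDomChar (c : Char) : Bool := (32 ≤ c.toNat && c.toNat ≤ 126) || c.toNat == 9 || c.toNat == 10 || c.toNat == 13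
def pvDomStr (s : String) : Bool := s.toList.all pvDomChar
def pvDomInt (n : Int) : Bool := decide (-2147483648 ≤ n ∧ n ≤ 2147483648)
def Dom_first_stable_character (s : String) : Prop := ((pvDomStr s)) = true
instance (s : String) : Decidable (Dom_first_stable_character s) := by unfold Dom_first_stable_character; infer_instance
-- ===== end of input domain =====

-- B replaces A's nested scans with one dictionary-building pass (first/last/count per character) plus one test scan.

-- ===== PORT A =====
-- A's outer while-loop over i, with the inner run loop (takeWhile), the appears-later scan
-- (contains on the remainder) and the seen set, ported as recursion on the suffix.
def pvLoopA (seen : PySem.Set Char) (l : List Char) : Option String :=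
  match l with
  | [] => none
  | ch :: rest =>
    if PySem.Set.contains seen ch then pvLoopA seen rest
    else
      let run := rest.takeWhile (fun x => x == ch)
      let count := 1 + run.length
      let after := rest.dropWhile (fun x => x == ch)
      let appears_later := after.contains ch
      if 2 ≤ count ∧ appears_later = false then some (String.ofList [ch])
      else pvLoopA (PySem.Set.add seen ch) after
termination_by l.length
decreasing_by
· simp
· simp only [List.length_cons]
  exact Nat.lt_succ_of_le (List.length_dropWhile_le _ _)

def first_stable_character (s : String) : Option String :=
  if PySem.Str.len s = 0 then none
  else pvLoopA PySem.Set.empty s.toList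

-- ===== PORT B =====
-- one fold over enumerate(s) building the first/last/count dicts
def pvStepB (st : PySem.Dict Char Int × PySem.Dict Char Int × PySem.Dict Char Int)
    (p : Int × Char) : PySem.Dict Char Int × PySem.Dict Char Int × PySem.Dict Char Int :=
  let (first, last, count) := st
  let (i, c) := p
  let first := if PySem.Dict.contains first c then first else PySem.Dict.insert first c i
  (first, PySem.Dict.insert last c i, PySem.Dict.insert count c (PySem.Dict.getD count c 0 + 1))

def pvBuildB (l : List Char) : PySem.Dict Char Int × PySem.Dict Char Int × PySem.Dict Char Int :=
  (PySem.List.enumerate l 0).foldl pvStepB (PySem.Dict.empty, PySem.Dict.empty, PySem.Dict.empty)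

-- the second loop: for c in s, return c on the first hit
def pvFindB (first last count : PySem.Dict Char Int) (l : List Char) : Option String :=
  match l with
  | [] => none
  | c :: rest =>
    if 2 ≤ PySem.Dict.getD count c 0 ∧
        PySem.Dict.getD last c 0 - PySem.Dict.getD first c 0 + 1 = PySem.Dict.getD count c 0 then
      some (String.ofList [c])
    else pvFindB first last count rest

def first_stable_character_alt (s : String) : Option String :=
  let l := s.toList
  let st := pvBuildB l
  pvFindB st.1 st.2.1 st.2.2 l

-- ===== PRECONDITION & SPEC =====
def Spec_first_stable_character (s : String) (out : Option String) : Prop := out = first_stable_character_alt s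
instance (s : String) (out : Option String) : Decidable (Spec_first_stable_character s out) := by unfold Spec_first_stable_character; infer_instance

-- ===== CLAIM (what is proved, stated in full; the proofs are below) =====
def Claim_equal_first_stable_character : Prop := ∀ (s : String), Dom_first_stable_character s → Spec_first_stable_character s (first_stable_character s)

-- ===== LEMMAS AND PROOFS =====

-- the common characterisation: c is "stable" in l
def pvStable (l : List Char) (c : Char) : Bool :=
  decide (2 ≤ l.count c) &&
    !((l.dropWhile (fun x => !(x == c))).dropWhile (fun x => x == c)).contains c

def pvRes (l : List Char) : Option String :=
  (l.find? (pvStable l)).map (fun c => String.ofList [c])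


-- A's local check at the first occurrence of an unseen character equals the global pvStable test
theorem stable_head (pre rest : List Char) (ch : Char) (hpre : ch ∉ pre) :
    pvStable (pre ++ ch :: rest) ch =
      (decide (2 ≤ 1 + (rest.takeWhile (fun x => x == ch)).length) &&
        !((rest.dropWhile (fun x => x == ch)).contains ch)) := by
  have hdrop : (pre ++ ch :: rest).dropWhile (fun x => !(x == ch)) = ch :: rest := by
    rw [List.dropWhile_append]
    have h1 : pre.dropWhile (fun x => !(x == ch)) = [] := by
      rw [List.dropWhile_eq_nil_iff]
      intro x hx
      simp only [Bool.not_eq_true']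
      exact beq_eq_false_iff_ne.mpr (fun h => hpre (h ▸ hx))
    simp [h1]
  have hcnt : (pre ++ ch :: rest).count ch = 1 + rest.count ch := by
    rw [List.count_append, List.count_cons_self, List.count_eq_zero.mpr hpre]
    omega
  unfold pvStable
  rw [hdrop, hcnt]
  have h2 : (ch :: rest).dropWhile (fun x => x == ch) = rest.dropWhile (fun x => x == ch) := by
    simp
  rw [h2]
  by_cases hc : (rest.dropWhile (fun x => x == ch)).contains ch = true
  · rw [List.contains_iff_mem] at hc
    simp [hc]
  · have hafter : rest.count ch = (rest.takeWhile (fun x => x == ch)).length := by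
      conv_lhs => rw [← List.takeWhile_append_dropWhile (p := fun x => x == ch) (l := rest)]
      rw [List.count_append]
      have hrun : (rest.takeWhile (fun x => x == ch)).count ch =
          (rest.takeWhile (fun x => x == ch)).length :=
        List.count_eq_length.mpr (fun b hb =>
          ((beq_iff_eq).mp (List.mem_takeWhile_imp (p := fun x => x == ch) hb)).symm)
      have hzero : (rest.dropWhile (fun x => x == ch)).count ch = 0 := by
        rw [List.count_eq_zero]
        intro hm
        exact hc (List.contains_iff_mem.mpr hm)
      omega
    rw [hafter]
  
theorem A_gen (n : Nat) : ∀ (suf pre : List Char) (seen : PySem.Set Char),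
    suf.length ≤ n →
    (∀ c, PySem.Set.contains seen c = true ↔ c ∈ pre) →
    (∀ c, c ∈ pre → c ∈ suf → pvStable (pre ++ suf) c = false) →
    pvLoopA seen suf = (suf.find? (pvStable (pre ++ suf))).map (fun c => String.ofList [c]) := by
  induction n with
  | zero =>
    intro suf pre seen hlen _ _
    have : suf = [] := List.length_eq_zero_iff.mp (Nat.le_zero.mp hlen)
    subst this
    simp [pvLoopA]
  | succ n ih =>
    intro suf pre seen hlen hseen hdead
    match suf with
    | [] => simp [pvLoopA]
    | ch :: rest =>
      rw [pvLoopA]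
      by_cases hs : PySem.Set.contains seen ch = true
      · have hch : ch ∈ pre := (hseen ch).mp hs
        have hfalse : pvStable (pre ++ ch :: rest) ch = false :=
          hdead ch hch List.mem_cons_self
        rw [if_pos hs, List.find?_cons_of_neg (by simp [hfalse])]
        have hl : pre ++ ch :: rest = (pre ++ [ch]) ++ rest := by simp
        rw [hl]
        refine ih rest (pre ++ [ch]) seen (by simpa using hlen) ?_ ?_
        · intro c
          rw [hseen c]
          constructor
          · intro h; exact List.mem_append_left _ h
          · intro h
            rcases List.mem_append.mp h with h | h
            · exact h
            · simpa using (List.mem_singleton.mp h) ▸ hch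
        · intro c hc hcr
          rw [← hl]
          rcases List.mem_append.mp hc with h | h
          · exact hdead c h (List.mem_cons_of_mem _ hcr)
          · rw [List.mem_singleton.mp h]
            exact hfalse
      · have hch : ch ∉ pre := fun h => hs ((hseen ch).mpr h)
        rw [if_neg hs]
        have hhead := stable_head pre rest ch hch
        have hrun_mem : ∀ x ∈ rest.takeWhile (fun x => x == ch), x = ch :=
          fun x hx => beq_iff_eq.mp (List.mem_takeWhile_imp (p := fun x => x == ch) hx)
        by_cases hok : 2 ≤ 1 + (rest.takeWhile (fun x => x == ch)).length ∧
            (rest.dropWhile (fun x => x == ch)).contains ch = false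
        · have htrue : pvStable (pre ++ ch :: rest) ch = true := by
            rw [hhead, hok.2]
            simp [hok.1]
          rw [if_pos hok, List.find?_cons_of_pos htrue]
          rfl
        · have hfalse : pvStable (pre ++ ch :: rest) ch = false := by
            rw [hhead]
            rcases Decidable.not_and_iff_not_or_not.mp hok with h | h
            · simp [h]
            · rw [Bool.not_eq_false, List.contains_iff_mem] at h
              simp [h]
          rw [if_neg hok, List.find?_cons_of_neg (by simp [hfalse])]
          have hnone : List.find? (pvStable (pre ++ ch :: rest)) (rest.takeWhile (fun x => x == ch)) = none := by
            rw [List.find?_eq_none]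
            intro x hx
            rw [hrun_mem x hx]
            simp [hfalse]
          set P := pvStable (pre ++ ch :: rest) with hP
          have hfr : List.find? P rest = List.find? P (rest.dropWhile (fun x => x == ch)) := by
            conv_lhs => rw [← List.takeWhile_append_dropWhile (p := fun x => x == ch) (l := rest)]
            rw [List.find?_append, hnone, Option.none_or]
          rw [hfr, hP]
          have hl : pre ++ ch :: rest =
              (pre ++ ch :: rest.takeWhile (fun x => x == ch)) ++ rest.dropWhile (fun x => x == ch) := by
            conv_lhs => rw [← List.takeWhile_append_dropWhile (p := fun x => x == ch) (l := rest)]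
            simp
          rw [hl]
          have hlen' : (rest.dropWhile (fun x => x == ch)).length ≤ n := by
            have := List.length_dropWhile_le (fun x => x == ch) rest
            simp only [List.length_cons] at hlen
            omega
          refine ih _ _ (PySem.Set.add seen ch) hlen' ?_ ?_
          · intro c
            rw [PySem.Set.contains_iff, PySem.Set.mem_add]
            constructor
            · intro h
              rcases h with h | h
              · exact List.mem_append_left _ ((hseen c).mp ((PySem.Set.contains_iff seen c).mpr h))
              · subst h; simp
            · intro h
              rcases List.mem_append.mp h with h | h
              · exact Or.inl ((PySem.Set.contains_iff seen c).mp ((hseen c).mpr h))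
              · rcases List.mem_cons.mp h with h | h
                · exact Or.inr h
                · exact Or.inr (hrun_mem c h)
          · intro c hc hca
            rw [← hl]
            have hcrest : c ∈ rest := (List.dropWhile_sublist _).mem hca
            rcases List.mem_append.mp hc with h | h
            · exact hdead c h (List.mem_cons_of_mem _ hcrest)
            · rcases List.mem_cons.mp h with h | h
              · subst h; exact hfalse
              · rw [hrun_mem c h]; exact hfalse

theorem A_eq_res : ∀ (l : List Char), l ≠ [] → pvLoopA PySem.Set.empty l = pvRes l := by
  intro l _
  unfold pvRes
  have := A_gen l.length l [] PySem.Set.empty le_rfl (by simp [PySem.Set.empty]) (by simp)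
  simpa using this


-- length of takeWhile equals length iff every element satisfies the predicate
theorem tw_len_eq_iff (p : Char → Bool) (l : List Char) :
    (l.takeWhile p).length = l.length ↔ ∀ a ∈ l, p a = true := by
  constructor
  · intro h
    rw [← List.takeWhile_eq_self_iff (p := p)]
    exact (List.takeWhile_prefix p).eq_of_length h
  · intro h
    rw [List.takeWhile_eq_self_iff.mpr h]

-- what one step of B's fold does to the three dictionaries, and the fold over l ++ [x]
theorem buildB_append (l : List Char) (x : Char) :
    pvBuildB (l ++ [x]) = pvStepB (pvBuildB l) ((l.length : Int), x) := by
  unfold pvBuildB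
  rw [PySem.List.enumerate_append, List.foldl_append]
  simp [PySem.List.enumerate_cons, PySem.List.enumerate_nil]

-- the fold computes, per character: total count, first index, last index
theorem build_spec (l : List Char) :
    (∀ c, (pvBuildB l).2.2.getD c 0 = (l.count c : Int)) ∧
    (∀ c, c ∉ l → (pvBuildB l).1.get? c = none ∧ (pvBuildB l).2.1.get? c = none) ∧
    (∀ c, c ∈ l →
      (pvBuildB l).1.get? c = some (((l.takeWhile (fun x => !(x == c))).length : Int)) ∧
      (pvBuildB l).2.1.get? c =
        some ((l.length : Int) - 1 - ((l.reverse.takeWhile (fun x => !(x == c))).length : Int))) := by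
  induction l using List.reverseRecOn with
  | nil =>
    refine ⟨?_, ?_, ?_⟩
    · intro c; simp [pvBuildB, PySem.List.enumerate_nil, PySem.Dict.getD_empty]
    · intro c _; simp [pvBuildB, PySem.List.enumerate_nil, PySem.Dict.get?_empty]
    · intro c hc; simp at hc
  | append_singleton l x ih =>
    obtain ⟨ihc, ihn, ihm⟩ := ih
    rw [buildB_append]
    by_cases hxl : x ∈ l
    · -- x already present: first unchanged, last overwritten at x, count bumped at x
      have hcontains : ((pvBuildB l).1).contains x = true := by
        rw [PySem.Dict.contains_eq_isSome_get?, (ihm x hxl).1]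
        rfl
      refine ⟨?_, ?_, ?_⟩
      · intro c
        simp only [pvStepB, hcontains, if_pos]
        rw [PySem.Dict.getD_insert]
        by_cases hcx : c = x
        · subst hcx
          rw [if_pos rfl, ihc c, List.count_append]
          simp
        · rw [if_neg hcx, ihc c, List.count_append]
          have : List.count c [x] = 0 := by
            simp [List.count_singleton]
            exact fun h => hcx h.symm
          rw [this]; simp
      · intro c hcm
        have hcl : c ∉ l := fun h => hcm (List.mem_append_left _ h)
        have hcx : c ≠ x := by
          intro h; exact hcm (by simp [h])
        simp only [pvStepB, hcontains, if_pos]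
        refine ⟨(ihn c hcl).1, ?_⟩
        rw [PySem.Dict.get?_insert, if_neg hcx]
        exact (ihn c hcl).2
      · intro c hcm
        simp only [pvStepB, hcontains, if_pos]
        by_cases hcx : c = x
        · subst hcx
          obtain ⟨ih1, _⟩ := ihm c hxl
          constructor
          · rw [ih1]
            congr 2
            rw [List.takeWhile_append]
            have : ¬ ((l.takeWhile (fun y => !(y == c))).length = l.length) := by
              rw [tw_len_eq_iff]
              intro hall
              have := hall c hxl
              simp at this
            rw [if_neg this]
          · rw [PySem.Dict.get?_insert, if_pos rfl]
            have hrev : (l ++ [c]).reverse = c :: l.reverse := by simp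
            rw [hrev]
            have : (c :: l.reverse).takeWhile (fun y => !(y == c)) = [] := by
              simp
            rw [this]
            simp
        · have hcl : c ∈ l := by
            rcases List.mem_append.mp hcm with h | h
            · exact h
            · exact absurd (List.mem_singleton.mp h) hcx
          obtain ⟨ih1, ih2⟩ := ihm c hcl
          have htw : (l ++ [x]).takeWhile (fun y => !(y == c)) = l.takeWhile (fun y => !(y == c)) := by
            rw [List.takeWhile_append]
            have : ¬ ((l.takeWhile (fun y => !(y == c))).length = l.length) := by
              rw [tw_len_eq_iff]
              intro hall
              have := hall c hcl
              simp at this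
            rw [if_neg this]
          constructor
          · rw [ih1, htw]
          · rw [PySem.Dict.get?_insert, if_neg hcx, ih2]
            have hrev : (l ++ [x]).reverse = x :: l.reverse := by simp
            rw [hrev]
            have : (x :: l.reverse).takeWhile (fun y => !(y == c)) =
                x :: l.reverse.takeWhile (fun y => !(y == c)) := by
              have hpx : (fun y => !(y == c)) x = true := by
                simp
                exact fun h => hcx h.symm
              simp [hpx]
            rw [this]
            simp only [List.length_append, List.length_cons, List.length_nil, Option.some.injEq]
            push_cast
            omega
    · -- x is new: first gains x at index |l|, last gains x, count gains x ↦ 1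
      have hcontains : ((pvBuildB l).1).contains x = false := by
        rw [PySem.Dict.contains_eq_isSome_get?, (ihn x hxl).1]
        rfl
      refine ⟨?_, ?_, ?_⟩
      · intro c
        simp only [pvStepB, hcontains, Bool.false_eq_true, if_false]
        rw [PySem.Dict.getD_insert]
        by_cases hcx : c = x
        · subst hcx
          rw [if_pos rfl, ihc c, List.count_append, List.count_eq_zero.mpr hxl]
          simp
        · rw [if_neg hcx, ihc c, List.count_append]
          have : List.count c [x] = 0 := by
            simp [List.count_singleton]
            exact fun h => hcx h.symm
          rw [this]; simp
      · intro c hcm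
        have hcl : c ∉ l := fun h => hcm (List.mem_append_left _ h)
        have hcx : c ≠ x := by
          intro h; exact hcm (by simp [h])
        simp only [pvStepB, hcontains, Bool.false_eq_true, if_false]
        constructor
        · rw [PySem.Dict.get?_insert, if_neg hcx]
          exact (ihn c hcl).1
        · rw [PySem.Dict.get?_insert, if_neg hcx]
          exact (ihn c hcl).2
      · intro c hcm
        simp only [pvStepB, hcontains, Bool.false_eq_true, if_false]
        by_cases hcx : c = x
        · subst hcx
          constructor
          · rw [PySem.Dict.get?_insert, if_pos rfl]
            have : (l ++ [c]).takeWhile (fun y => !(y == c)) = l := by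
              rw [List.takeWhile_append]
              have hall : (l.takeWhile (fun y => !(y == c))).length = l.length := by
                rw [tw_len_eq_iff]
                intro a ha
                simp
                exact fun h => hxl (h ▸ ha)
              rw [if_pos hall]
              simp
            rw [this]
          · rw [PySem.Dict.get?_insert, if_pos rfl]
            have hrev : (l ++ [c]).reverse = c :: l.reverse := by simp
            rw [hrev]
            have : (c :: l.reverse).takeWhile (fun y => !(y == c)) = [] := by
              simp
            rw [this]
            simp
        · have hcl : c ∈ l := by
            rcases List.mem_append.mp hcm with h | h
            · exact h
            · exact absurd (List.mem_singleton.mp h) hcx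
          obtain ⟨ih1, ih2⟩ := ihm c hcl
          have htw : (l ++ [x]).takeWhile (fun y => !(y == c)) = l.takeWhile (fun y => !(y == c)) := by
            rw [List.takeWhile_append]
            have : ¬ ((l.takeWhile (fun y => !(y == c))).length = l.length) := by
              rw [tw_len_eq_iff]
              intro hall
              have := hall c hcl
              simp at this
            rw [if_neg this]
          constructor
          · rw [PySem.Dict.get?_insert, if_neg hcx, ih1, htw]
          · rw [PySem.Dict.get?_insert, if_neg hcx, ih2]
            have hrev : (l ++ [x]).reverse = x :: l.reverse := by simp
            rw [hrev]
            have : (x :: l.reverse).takeWhile (fun y => !(y == c)) =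
                x :: l.reverse.takeWhile (fun y => !(y == c)) := by
              have hpx : (fun y => !(y == c)) x = true := by
                simp
                exact fun h => hcx h.symm
              simp [hpx]
            rw [this]
            simp only [List.length_append, List.length_cons, List.length_nil, Option.some.injEq]
            push_cast
            omega

-- B's arithmetic test (count ≥ 2 and last-first+1 = count) is the pvStable test, for c ∈ l
theorem pred_eq_stable (l : List Char) (c : Char) (hc : c ∈ l) :
    ((2 ≤ (l.count c : Int) ∧
      ((l.length : Int) - 1 - ((l.reverse.takeWhile (fun x => !(x == c))).length : Int)) -
        ((l.takeWhile (fun x => !(x == c))).length : Int) + 1 = (l.count c : Int)) ↔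
      pvStable l c = true) := by
  set p := l.takeWhile (fun x => !(x == c)) with hp
  have hcp : c ∉ p := by
    intro hcc
    have := List.mem_takeWhile_imp (p := fun x => !(x == c)) hcc
    simp at this
  have hl0 : l = p ++ l.dropWhile (fun x => !(x == c)) := (List.takeWhile_append_dropWhile).symm
  obtain ⟨rest, hm⟩ : ∃ rest, l.dropWhile (fun x => !(x == c)) = c :: rest := by
    have hne : l.dropWhile (fun x => !(x == c)) ≠ [] := by
      intro hnil
      rw [hl0, hnil, List.append_nil] at hc
      exact hcp hc
    have hhead := List.head_dropWhile_not (fun x => !(x == c)) hne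
    obtain ⟨d, t, hdt⟩ := List.exists_cons_of_ne_nil hne
    refine ⟨t, ?_⟩
    rw [hdt]
    have : d = c := by
      simp only [hdt, List.head_cons] at hhead
      simpa using hhead
    rw [this]
  have hl : l = p ++ c :: rest := by rw [hl0, hm]
  set run := rest.takeWhile (fun x => x == c) with hrun
  set after := rest.dropWhile (fun x => x == c) with hafter
  have hra : rest = run ++ after := (List.takeWhile_append_dropWhile).symm
  have hrmem : ∀ x ∈ run, x = c :=
    fun x hx => beq_iff_eq.mp (List.mem_takeWhile_imp (p := fun x => x == c) hx)
  have hcnt : l.count c = 1 + run.length + after.count c := by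
    rw [hl, List.count_append, List.count_cons_self, List.count_eq_zero.mpr hcp]
    conv_lhs => rw [hra]
    rw [List.count_append, List.count_eq_length.mpr (fun b hb => (hrmem b hb).symm)]
    omega
  have hll : l.length = p.length + 1 + run.length + after.length := by
    conv_lhs => rw [hl, hra]
    simp
    omega
  have hst : pvStable l c = (decide (2 ≤ 1 + run.length) && !after.contains c) := by
    conv_lhs => rw [hl]
    exact stable_head p rest c hcp
  have hrepl : c :: run = List.replicate (run.length + 1) c := by
    rw [List.eq_replicate_iff]
    constructor
    · simp
    · intro b hb
      rcases List.mem_cons.mp hb with h | h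
      · exact h
      · exact hrmem b h
  have hl2 : l = (p ++ (c :: run)) ++ after := by
    rw [hl, hra]
    simp
  have hlrev : l.reverse = after.reverse ++ (List.replicate (run.length + 1) c ++ p.reverse) := by
    rw [hl2, List.reverse_append, List.reverse_append, hrepl, List.reverse_replicate]
  by_cases hA : after.contains c = true
  · -- c reappears after the first run: both sides are false
    have hcin : c ∈ after := List.contains_iff_mem.mp hA
    have hcw : c ∈ after.reverse := by simpa using hcin
    set u := after.reverse.takeWhile (fun x => !(x == c)) with hu
    set v := after.reverse.dropWhile (fun x => !(x == c)) with hv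
    have hw : after.reverse = u ++ v := (List.takeWhile_append_dropWhile).symm
    have hcu : c ∉ u := by
      intro hcc
      have := List.mem_takeWhile_imp (p := fun x => !(x == c)) hcc
      simp at this
    have hcv : c ∈ v := by
      rcases List.mem_append.mp (hw ▸ hcw) with h | h
      · exact absurd h hcu
      · exact h
    have hTW : l.reverse.takeWhile (fun x => !(x == c)) = u := by
      rw [hlrev, List.takeWhile_append]
      have hcond : ¬ ((after.reverse.takeWhile (fun x => !(x == c))).length = after.reverse.length) := by
        rw [tw_len_eq_iff]
        intro hall
        have := hall c hcw
        simp at this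
      rw [if_neg hcond]
    have hvne : v ≠ [] := List.ne_nil_of_mem hcv
    obtain ⟨d, after₂, hd⟩ : ∃ d after₂, after = d :: after₂ := by
      obtain ⟨d, t, hdt⟩ := List.exists_cons_of_ne_nil (List.ne_nil_of_mem hcin)
      exact ⟨d, t, hdt⟩
    have hdc : d ≠ c := by
      have hne : rest.dropWhile (fun x => x == c) ≠ [] := by rw [← hafter, hd]; simp
      have hhead := List.head_dropWhile_not (fun x => x == c) hne
      simp only [← hafter, hd, List.head_cons] at hhead
      simpa using hhead
    have hdv : d ∈ v := by
      have h1 : after.reverse.getLast? = some d := by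
        rw [hd, List.reverse_cons, List.getLast?_concat]
      have h2 : v.getLast? = some d := by
        rw [hw, List.getLast?_append] at h1
        cases hvlast : v.getLast? with
        | none => exact absurd hvlast (by simpa using List.getLast?_eq_none_iff.not.mpr (by simpa using hvne))
        | some e =>
          rw [hvlast] at h1
          simpa using h1
      exact List.mem_of_getLast? h2
    have hvcnt : v.count c < v.length := by
      refine Nat.lt_of_le_of_ne (List.count_le_length) ?_
      intro heq
      exact hdc ((List.count_eq_length.mp heq) d hdv).symm
    have hacnt : after.count c = v.count c := by
      have h1 : after.reverse.count c = after.count c := List.count_reverse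
      have h2 : u.count c = 0 := List.count_eq_zero.mpr hcu
      rw [← h1, hw, List.count_append, h2]
      omega
    have hal : after.length = u.length + v.length := by
      have := congrArg List.length hw
      simpa using this
    rw [hst, hTW, hcnt]
    simp only [hA, Bool.not_true, Bool.and_false, Bool.false_eq_true, iff_false]
    intro hcontra
    obtain ⟨h1, h2⟩ := hcontra
    rw [hacnt, hll] at h2
    push_cast at h2
    omega
  · -- all occurrences in one block: the arithmetic test reduces to count ≥ 2
    have hcnot : c ∉ after := fun h => hA (List.contains_iff_mem.mpr h)
    have hTW : l.reverse.takeWhile (fun x => !(x == c)) = after.reverse := by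
      rw [hlrev, List.takeWhile_append]
      have hcond : (after.reverse.takeWhile (fun x => !(x == c))).length = after.reverse.length := by
        rw [tw_len_eq_iff]
        intro a ha
        simp only [Bool.not_eq_true']
        refine beq_eq_false_iff_ne.mpr ?_
        intro hac
        exact hcnot (by simpa [hac] using (List.mem_reverse.mp ha))
      rw [if_pos hcond, List.replicate_succ, List.cons_append, List.takeWhile_cons]
      simp
    have hacnt : after.count c = 0 := List.count_eq_zero.mpr hcnot
    rw [hst, hTW, hcnt, hacnt]
    have hAfalse : after.contains c = false := by
      rw [← Bool.not_eq_true, List.contains_iff_mem]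
      exact hcnot
    simp only [hAfalse, Bool.not_false, Bool.and_true, decide_eq_true_eq, List.length_reverse]
    rw [hll]
    push_cast
    omega

theorem B_eq_res : ∀ (l : List Char),

    pvFindB (pvBuildB l).1 (pvBuildB l).2.1 (pvBuildB l).2.2 l = pvRes l := by
  intro l
  obtain ⟨ihc, ihn, ihm⟩ := build_spec l
  unfold pvRes
  suffices h : ∀ suf : List Char, (∀ c ∈ suf, c ∈ l) →
      pvFindB (pvBuildB l).1 (pvBuildB l).2.1 (pvBuildB l).2.2 suf =
        (suf.find? (pvStable l)).map (fun c => String.ofList [c]) by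
    exact h l (fun _ hc => hc)
  intro suf
  induction suf with
  | nil => intro _; simp [pvFindB]
  | cons c rest ih =>
    intro hsub
    have hcl : c ∈ l := hsub c List.mem_cons_self
    obtain ⟨ih1, ih2⟩ := ihm c hcl
    have hfd : (pvBuildB l).1.getD c 0 = ((l.takeWhile (fun x => !(x == c))).length : Int) := by
      rw [PySem.Dict.getD_eq_get?_getD, ih1]; rfl
    have hld : (pvBuildB l).2.1.getD c 0 =
        (l.length : Int) - 1 - ((l.reverse.takeWhile (fun x => !(x == c))).length : Int) := by
      rw [PySem.Dict.getD_eq_get?_getD, ih2]; rfl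
    rw [pvFindB]
    rw [hfd, hld, ihc c]
    by_cases hst : pvStable l c = true
    · rw [if_pos ((pred_eq_stable l c hcl).mpr hst), List.find?_cons_of_pos hst]
      rfl
    · have hnot : ¬ (2 ≤ (l.count c : Int) ∧
          ((l.length : Int) - 1 - ((l.reverse.takeWhile (fun x => !(x == c))).length : Int)) -
            ((l.takeWhile (fun x => !(x == c))).length : Int) + 1 = (l.count c : Int)) :=
        fun h => hst ((pred_eq_stable l c hcl).mp h)
      rw [if_neg hnot, List.find?_cons_of_neg (by simpa using hst)]
      exact ih (fun d hd => hsub d (List.mem_cons_of_mem _ hd))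

-- ===== VERDICT (by name: the statement is the Claim_ definition above) =====
theorem first_stable_character_spec : Claim_equal_first_stable_character := by
  intro s _
  unfold Spec_first_stable_character first_stable_character first_stable_character_alt
  by_cases h : PySem.Str.len s = 0
  · have hl : s.toList = [] := by
      simpa [PySem.Str.len_eq, List.length_eq_zero_iff] using h
    simp [hl, pvFindB]
  · have hl : s.toList ≠ [] := by
      intro hc
      simp [PySem.Str.len_eq, hc] at h
    simp only [h, if_false]
    rw [A_eq_res _ hl, ← B_eq_res]
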